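-- pv_equiv track=rewrite | github.com/researchartifact-oss/Evolution-of-Log-Based-Detection-Rules | data_prep/align_src/structural_ops_helpers.py | assign_dominant_pattern
-- ===== SOURCE A (Python) =====
-- from typing import Any, Dict, List, Optional, Set, Tuple
--
-- PAT_PURE_EXPANSION        = "PURE_EXPANSION"
--
-- PAT_PURE_CONTRACTION      = "PURE_CONTRACTION"
--
-- PAT_MIXED                 = "MIXED"
--
-- PAT_RESTRUCTURING_ONLY    = "RESTRUCTURING_ONLY"
--
-- PAT_PRED_VALUE_UPDATE_ONLY = "PRED_VALUE_UPDATE_ONLY"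
--
-- PAT_NO_STRUCTURAL_EDITS   = "NO_STRUCTURAL_EDITS"
--
-- def assign_pattern_labels(metrics: Dict[str, Any]) -> List[str]:
--     """Assign structural evolution pattern labels (overlapping) to a lineage.
--
--     Pattern names (paper-final):
--       PURE_EXPANSION          expansion with no contraction (reorganization allowed)
--       PURE_CONTRACTION        contraction with no expansion (reorganization allowed)
--       MIXED                   both expansion and contraction (reorganization allowed)
--       RESTRUCTURING_ONLY      scope-level changes; zero expansion and contraction
--       PRED_VALUE_UPDATE_ONLY  only PRED_UPDATE; no structural ops
--
--     A lineage receives all applicable labels; assign_dominant_pattern picks one.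
--     """
--     labels: List[str] = []
--     if metrics.get("n_structural_steps", 0) == 0:
--         return [PAT_NO_STRUCTURAL_EDITS]
--
--     if metrics.get("is_pred_update_only"):
--         labels.append(PAT_PRED_VALUE_UPDATE_ONLY)
--     if metrics.get("restructure_dominated"):
--         labels.append(PAT_RESTRUCTURING_ONLY)
--     if metrics.get("is_monotonic_expand") and not metrics.get("restructure_dominated"):
--         labels.append(PAT_PURE_EXPANSION)
--     if metrics.get("is_monotonic_contract") and not metrics.get("restructure_dominated"):
--         labels.append(PAT_PURE_CONTRACTION)
--     if metrics.get("is_mixed") and not metrics.get("restructure_dominated"):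
--         labels.append(PAT_MIXED)
--     if not labels:
--         # Paper-final taxonomy has no residual "other" bucket: any lineage with
--         # both expansion and contraction belongs to MIXED, even if reorganization
--         # also occurs. Keep MIXED as the defensive fallback for any unforeseen
--         # non-monotonic combination that reaches this point.
--         labels.append(PAT_MIXED)
--
--     return labels
--
-- def assign_dominant_pattern(metrics: Dict[str, Any]) -> str:
--     """Assign a single dominant pattern label using priority order.
--
--     Priority: PURE_EXPANSION / PURE_CONTRACTION > MIXED
--               > RESTRUCTURING_ONLY > PRED_VALUE_UPDATE_ONLY
--     """
--     labels = assign_pattern_labels(metrics)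
--     priority = [
--         PAT_PURE_EXPANSION, PAT_PURE_CONTRACTION,
--         PAT_MIXED, PAT_RESTRUCTURING_ONLY, PAT_PRED_VALUE_UPDATE_ONLY,
--         PAT_NO_STRUCTURAL_EDITS,
--     ]
--     for pat in priority:
--         if pat in labels:
--             return pat
--     return PAT_MIXED
-- ===== SOURCE B (Python) =====
-- PAT_PURE_EXPANSION        = "PURE_EXPANSION"
-- PAT_PURE_CONTRACTION      = "PURE_CONTRACTION"
-- PAT_MIXED                 = "MIXED"
-- PAT_RESTRUCTURING_ONLY    = "RESTRUCTURING_ONLY"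
-- PAT_PRED_VALUE_UPDATE_ONLY = "PRED_VALUE_UPDATE_ONLY"
-- PAT_NO_STRUCTURAL_EDITS   = "NO_STRUCTURAL_EDITS"
--
-- def assign_dominant_pattern(metrics):
--     """Return the single dominant pattern by short-circuit priority checks."""
--     if metrics.get("n_structural_steps", 0) == 0:
--         return PAT_NO_STRUCTURAL_EDITS
--     rd = metrics.get("restructure_dominated")
--     if metrics.get("is_monotonic_expand") and not rd:
--         return PAT_PURE_EXPANSION
--     if metrics.get("is_monotonic_contract") and not rd:
--         return PAT_PURE_CONTRACTION
--     if metrics.get("is_mixed") and not rd: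
--         return PAT_MIXED
--     if rd:
--         return PAT_RESTRUCTURING_ONLY
--     if metrics.get("is_pred_update_only"):
--         return PAT_PRED_VALUE_UPDATE_ONLY
--     return PAT_MIXED
-- ===== Notes on version B (the rewrite author's own statement) =====
-- stated objective: simpler
-- what changed: Inlines assign_pattern_labels into a single short-circuit chain of returns in priority order; no labels list is built and no priority array is scanned.
import Mathlib
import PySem

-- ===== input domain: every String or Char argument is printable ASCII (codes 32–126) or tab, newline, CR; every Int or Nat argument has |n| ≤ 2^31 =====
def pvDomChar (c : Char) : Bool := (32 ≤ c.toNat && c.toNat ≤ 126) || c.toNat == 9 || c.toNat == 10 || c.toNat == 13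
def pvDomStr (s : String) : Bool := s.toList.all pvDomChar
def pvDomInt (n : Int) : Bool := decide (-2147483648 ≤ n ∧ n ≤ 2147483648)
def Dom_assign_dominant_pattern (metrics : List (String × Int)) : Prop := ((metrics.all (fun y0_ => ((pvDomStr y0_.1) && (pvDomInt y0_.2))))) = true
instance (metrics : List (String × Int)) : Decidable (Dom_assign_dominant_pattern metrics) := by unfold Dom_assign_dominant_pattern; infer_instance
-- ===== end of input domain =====

-- B inlines the label-list construction into one short-circuit chain of returns in
-- priority order (objective: simpler).

-- dict.get(k): first match in the association list
def pvGet (metrics : List (String × Int)) (k : String) : Option Int :=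
  (metrics.find? (fun p => p.1 == k)).map (·.2)

-- truthiness of metrics.get(k) (missing key → None → falsy; int truthy iff ≠ 0)
def pvTruthy (metrics : List (String × Int)) (k : String) : Bool :=
  match pvGet metrics k with
  | some v => v != 0
  | none => false

-- ===== PORT A =====
def assign_pattern_labels (metrics : List (String × Int)) : List String :=
  if (pvGet metrics "n_structural_steps").getD 0 == 0 then
    ["NO_STRUCTURAL_EDITS"]
  else
    let labels : List String := []
    let labels := if pvTruthy metrics "is_pred_update_only" then labels ++ ["PRED_VALUE_UPDATE_ONLY"] else labels
    let labels := if pvTruthy metrics "restructure_dominated" then labels ++ ["RESTRUCTURING_ONLY"] else labels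
    let labels := if pvTruthy metrics "is_monotonic_expand" && !(pvTruthy metrics "restructure_dominated") then labels ++ ["PURE_EXPANSION"] else labels
    let labels := if pvTruthy metrics "is_monotonic_contract" && !(pvTruthy metrics "restructure_dominated") then labels ++ ["PURE_CONTRACTION"] else labels
    let labels := if pvTruthy metrics "is_mixed" && !(pvTruthy metrics "restructure_dominated") then labels ++ ["MIXED"] else labels
    let labels := if labels.isEmpty then labels ++ ["MIXED"] else labels
    labels

def assign_dominant_pattern (metrics : List (String × Int)) : String :=
  let labels := assign_pattern_labels metrics
  let priority : List String :=
    ["PURE_EXPANSION", "PURE_CONTRACTION", "MIXED", "RESTRUCTURING_ONLY",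
     "PRED_VALUE_UPDATE_ONLY", "NO_STRUCTURAL_EDITS"]
  match priority.find? (fun pat => labels.contains pat) with
  | some pat => pat
  | none => "MIXED"

-- ===== PORT B =====
def assign_dominant_pattern_alt (metrics : List (String × Int)) : String :=
  if (pvGet metrics "n_structural_steps").getD 0 == 0 then
    "NO_STRUCTURAL_EDITS"
  else
    let rd := pvTruthy metrics "restructure_dominated"
    if pvTruthy metrics "is_monotonic_expand" && !rd then "PURE_EXPANSION"
    else if pvTruthy metrics "is_monotonic_contract" && !rd then "PURE_CONTRACTION"
    else if pvTruthy metrics "is_mixed" && !rd then "MIXED"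
    else if rd then "RESTRUCTURING_ONLY"
    else if pvTruthy metrics "is_pred_update_only" then "PRED_VALUE_UPDATE_ONLY"
    else "MIXED"

-- ===== PRECONDITION & SPEC =====
def Spec_assign_dominant_pattern (metrics : List (String × Int)) (out : String) : Prop := out = assign_dominant_pattern_alt metrics
instance (metrics : List (String × Int)) (out : String) : Decidable (Spec_assign_dominant_pattern metrics out) := by unfold Spec_assign_dominant_pattern; infer_instance

-- ===== CLAIM (what is proved, stated in full; the proofs are below) =====
def Claim_equal_assign_dominant_pattern : Prop := ∀ (metrics : List (String × Int)), Dom_assign_dominant_pattern metrics → Spec_assign_dominant_pattern metrics (assign_dominant_pattern metrics)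

-- ===== LEMMAS AND PROOFS =====

-- ===== VERDICT (by name: the statement is the Claim_ definition above) =====
set_option maxRecDepth 8192 in
theorem assign_dominant_pattern_spec : Claim_equal_assign_dominant_pattern := by
  intro m _
  unfold Spec_assign_dominant_pattern assign_dominant_pattern assign_dominant_pattern_alt
    assign_pattern_labels
  by_cases h0 : ((pvGet m "n_structural_steps").getD 0 == 0) = true <;>
  by_cases h1 : pvTruthy m "is_pred_update_only" = true <;>
  by_cases h2 : pvTruthy m "restructure_dominated" = true <;>
  by_cases h3 : pvTruthy m "is_monotonic_expand" = true <;>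
  by_cases h4 : pvTruthy m "is_monotonic_contract" = true <;>
  by_cases h5 : pvTruthy m "is_mixed" = true <;>
  · simp only [Bool.not_eq_true] at *
    simp only [h0, h1, h2, h3, h4, h5]
    decide
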